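-- pv_equiv track=rewrite | github.com/tonyzhao-jt/TradingIndicators | posttrain/reward_function.py | _has_syntax_errors
-- ===== SOURCE A (Python) =====
-- def _has_syntax_errors(response: str) -> bool:
--     """Basic check for obvious syntax errors."""
--     # Check for unmatched brackets/parentheses
--     brackets = {'(': ')', '[': ']', '{': '}'}
--     stack = []
--
--     for char in response:
--         if char in brackets:
--             stack.append(brackets[char])
--         elif char in brackets.values():
--             if not stack or stack.pop() != char:
--                 return True
--
--     return len(stack) > 0
-- ===== SOURCE B (Python) =====
-- def _has_syntax_errors(response: str) -> bool:
--     """Basic check for obvious syntax errors."""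
--     # Keep only the bracket characters, then cancel adjacent matched pairs
--     # until a fixed point; any leftover bracket means an error.
--     s = "".join(ch for ch in response if ch in "()[]{}")
--     while True:
--         t = s.replace("()", "").replace("[]", "").replace("{}", "")
--         if t == s:
--             break
--         s = t
--     return bool(s)
-- ===== Notes on version B (the rewrite author's own statement) =====
-- stated objective: alternative
-- what changed: Replaces A's single-pass stack automaton with a rewriting recognizer: B filters the string down to its bracket characters and repeatedly deletes all adjacent matched bracket pairs until a fixed point; brackets remain iff the string is ill-bracketed.
import Mathlib
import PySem

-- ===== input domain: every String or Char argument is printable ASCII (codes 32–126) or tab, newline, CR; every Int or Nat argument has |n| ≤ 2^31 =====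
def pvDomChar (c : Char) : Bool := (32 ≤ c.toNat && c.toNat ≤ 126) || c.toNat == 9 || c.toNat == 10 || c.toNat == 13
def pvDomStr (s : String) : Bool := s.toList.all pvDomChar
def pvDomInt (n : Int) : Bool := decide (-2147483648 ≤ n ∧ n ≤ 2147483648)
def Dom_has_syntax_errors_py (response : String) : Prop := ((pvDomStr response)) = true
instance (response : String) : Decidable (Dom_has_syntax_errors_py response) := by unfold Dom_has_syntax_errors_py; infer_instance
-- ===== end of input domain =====

-- B replaces A's single-pass stack check by a fixed-point cancellation of adjacent
-- matched bracket pairs over the bracket-only subsequence (objective: alternative;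
-- a timing run measured B faster, its passes run in C-level str.replace).

-- ===== PORT A =====
-- brackets[char] of A's dict
def closerOf (c : Char) : Char := if c = '(' then ')' else if c = '[' then ']' else '}'

-- one iteration of A's for-loop; 'none' models the early 'return True';
-- the Python stack (append/pop at the end) is modeled with the list head as top.
def stepA (acc : Option (List Char)) (ch : Char) : Option (List Char) :=
  match acc with
  | none => none
  | some stack =>
    if ch = '(' || ch = '[' || ch = '{' then some (closerOf ch :: stack)
    else if ch = ')' || ch = ']' || ch = '}' then
      match stack with
      | [] => none
      | top :: rest => if top = ch then some rest else none
    else some stack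

def has_syntax_errors_py (response : String) : Bool :=
  match response.toList.foldl stepA (some []) with
  | none => true
  | some stack => decide (stack.length > 0)

-- ===== PORT B =====
-- ch in "()[]{}"
def isBracketB (c : Char) : Bool :=
  c = '(' || c = ')' || c = '[' || c = ']' || c = '{' || c = '}'

-- s.replace(o ++ c, ""): remove all (non-overlapping, left-to-right) adjacent pairs o,c
def repl (o c : Char) : List Char → List Char
  | a :: b :: t => if a = o ∧ b = c then repl o c t else a :: repl o c (b :: t)
  | l => l
termination_by l => l.length

-- the three replaces of one pass of B's while-loop
def stepR (s : List Char) : List Char :=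
  repl '{' '}' (repl '[' ']' (repl '(' ')' s))

theorem repl_sublist (o c : Char) (l : List Char) : (repl o c l).Sublist l := by
  fun_induction repl o c l with
  | case1 a b t h ih => exact ih.trans ((List.sublist_cons_self b t).trans (List.sublist_cons_self a _))
  | case2 a b t h ih => exact List.Sublist.cons₂ a ih
  | case3 l h => exact List.Sublist.refl l

theorem stepR_len_lt (s : List Char) (h : stepR s ≠ s) : (stepR s).length < s.length := by
  have h1 := (repl_sublist '(' ')' s).length_le
  have h2 := (repl_sublist '[' ']' (repl '(' ')' s)).length_le
  have h3 := (repl_sublist '{' '}' (repl '[' ']' (repl '(' ')' s))).length_le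
  unfold stepR at h ⊢
  rcases Nat.lt_or_ge (repl '{' '}' (repl '[' ']' (repl '(' ')' s))).length s.length with hlt | hge
  -- h is used below
  · exact hlt
  · exfalso
    have e3 : (repl '{' '}' (repl '[' ']' (repl '(' ')' s))).length = s.length := le_antisymm (le_trans h3 (le_trans h2 h1)) hge
    have e1 : (repl '(' ')' s) = s :=
      (repl_sublist '(' ')' s).eq_of_length (le_antisymm h1 (by omega))
    rw [e1] at h e3 h2 h3
    have e2 : (repl '[' ']' s) = s :=
      (repl_sublist '[' ']' s).eq_of_length (le_antisymm h2 (by omega))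
    rw [e2] at h e3
    exact h ((repl_sublist '{' '}' s).eq_of_length e3)

-- fixed-point iteration of B's while-loop
def reduceFix (s : List Char) : List Char :=
  if h : stepR s = s then s else reduceFix (stepR s)
termination_by s.length
decreasing_by exact stepR_len_lt s h

def has_syntax_errors_py_alt (response : String) : Bool :=
  !(reduceFix (response.toList.filter isBracketB)).isEmpty

-- ===== PRECONDITION & SPEC =====
def Spec_has_syntax_errors_py (response : String) (out : Bool) : Prop := out = has_syntax_errors_py_alt response
instance (response : String) (out : Bool) : Decidable (Spec_has_syntax_errors_py response out) := by unfold Spec_has_syntax_errors_py; infer_instance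

-- ===== CLAIM (what is proved, stated in full; the proofs are below) =====
def Claim_equal_has_syntax_errors_py : Prop := ∀ (response : String), Dom_has_syntax_errors_py response → Spec_has_syntax_errors_py response (has_syntax_errors_py response)

-- ===== LEMMAS AND PROOFS =====

def isOpenB (c : Char) : Bool := c = '(' || c = '[' || c = '{'
def isCloseB (c : Char) : Bool := c = ')' || c = ']' || c = '}'

-- a "matched pair" (o,c): one of the three bracket pairs
def IsPair (o c : Char) : Prop :=
  (o = '(' ∧ c = ')') ∨ (o = '[' ∧ c = ']') ∨ (o = '{' ∧ c = '}')

theorem foldl_stepA_none (l : List Char) : l.foldl stepA none = none := by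
  induction l with
  | nil => rfl
  | cons a t ih => simpa [stepA] using ih

theorem stepA_nonbracket (st : Option (List Char)) (c : Char) (h : isBracketB c = false) :
    stepA st c = st := by
  cases st with
  | none => rfl
  | some s =>
    simp only [isBracketB, Bool.or_eq_false_iff, decide_eq_false_iff_not] at h
    obtain ⟨⟨⟨⟨⟨h1, h2⟩, h3⟩, h4⟩, h5⟩, h6⟩ := h
    simp [stepA, h1, h2, h3, h4, h5, h6]

theorem foldl_stepA_filter (l : List Char) (st : Option (List Char)) :
    (l.filter isBracketB).foldl stepA st = l.foldl stepA st := by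
  induction l generalizing st with
  | nil => rfl
  | cons a t ih =>
    by_cases h : isBracketB a
    · simp [h, ih]
    · simp only [Bool.not_eq_true] at h
      simp [h, ih, stepA_nonbracket st a h]

theorem stepA_pair (o c : Char) (hp : IsPair o c) (st : Option (List Char)) :
    stepA (stepA st o) c = st := by
  cases st with
  | none => rfl
  | some s =>
    rcases hp with ⟨ho, hc⟩ | ⟨ho, hc⟩ | ⟨ho, hc⟩ <;> subst ho <;> subst hc <;>
      simp [stepA, closerOf]

theorem repl_cons_pair (o c : Char) (t : List Char) : repl o c (o :: c :: t) = repl o c t := by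
  conv_lhs => rw [repl.eq_def]
  simp

theorem repl_cons_ne (o c a b : Char) (t : List Char) (h : ¬(a = o ∧ b = c)) :
    repl o c (a :: b :: t) = a :: repl o c (b :: t) := by
  conv_lhs => rw [repl.eq_def]
  simp [h]

theorem foldl_stepA_repl (o c : Char) (hp : IsPair o c) (l : List Char) :
    ∀ (st : Option (List Char)), (repl o c l).foldl stepA st = l.foldl stepA st := by
  fun_induction repl o c l with
  | case1 a b t h ih =>
    intro st
    obtain ⟨h1, h2⟩ := h
    rw [ih st, h1, h2, List.foldl_cons, List.foldl_cons, stepA_pair o c hp st]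
  | case2 a b t h ih => intro st; simp [List.foldl_cons, ih]
  | case3 l h => intro st; rfl

theorem foldl_stepA_stepR (l : List Char) (st : Option (List Char)) :
    (stepR l).foldl stepA st = l.foldl stepA st := by
  unfold stepR
  rw [foldl_stepA_repl '{' '}' (by simp [IsPair]) _ st,
      foldl_stepA_repl '[' ']' (by simp [IsPair]) _ st,
      foldl_stepA_repl '(' ')' (by simp [IsPair]) _ st]

theorem foldl_stepA_reduceFix (l : List Char) (st : Option (List Char)) :
    (reduceFix l).foldl stepA st = l.foldl stepA st := by
  fun_induction reduceFix l with
  | case1 l h => rfl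
  | case2 l h ih => rw [ih, foldl_stepA_stepR]

theorem reduceFix_sublist (l : List Char) : (reduceFix l).Sublist l := by
  fun_induction reduceFix l with
  | case1 l h => exact List.Sublist.refl l
  | case2 l h ih =>
    exact ih.trans ((repl_sublist '{' '}' _).trans ((repl_sublist '[' ']' _).trans (repl_sublist '(' ')' _)))

theorem reduceFix_fixed (l : List Char) : stepR (reduceFix l) = reduceFix l := by
  fun_induction reduceFix l with
  | case1 l h => exact h
  | case2 l h ih => exact ih

-- an adjacent pair forces repl to shorten
theorem repl_lt_of_adj (o c : Char) (y : List Char) :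
    ∀ (x : List Char), (repl o c (x ++ o :: c :: y)).length < (x ++ o :: c :: y).length := by
  intro x
  induction x with
  | nil =>
    have := (repl_sublist o c y).length_le
    rw [List.nil_append, repl_cons_pair]
    simp; omega
  | cons a xt ih =>
    cases xt with
    | nil =>
      by_cases h : a = o ∧ o = c
      · have hrw : repl o c (a :: o :: c :: y) = repl o c (c :: y) := by
          conv_lhs => rw [repl.eq_def]
          simp [h.1, h.2]
        have hle := (repl_sublist o c (c :: y)).length_le
        rw [List.cons_append, List.nil_append, hrw]
        simp at hle ⊢; omega
      · rw [List.cons_append, List.nil_append, repl_cons_ne o c a o _ h]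
        simpa using ih
    | cons b xt' =>
      by_cases h : a = o ∧ b = c
      · have hrw : repl o c (a :: b :: (xt' ++ o :: c :: y)) = repl o c (xt' ++ o :: c :: y) := by
          conv_lhs => rw [repl.eq_def]
          simp [h.1, h.2]
        have hle := (repl_sublist o c (xt' ++ o :: c :: y)).length_le
        rw [List.cons_append, List.cons_append, hrw]
        simp at hle ⊢; omega
      · rw [List.cons_append, List.cons_append, repl_cons_ne o c a b _ h,
            ← List.cons_append, ← List.cons_append]
        simpa using ih

theorem no_adj_of_repl_eq (o c : Char) (l : List Char) (h : repl o c l = l) :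
    ∀ (x y : List Char), l ≠ x ++ o :: c :: y := by
  intro x y hl
  have := repl_lt_of_adj o c y x
  rw [← hl, h] at this
  omega

-- each of the three replaces is the identity at a fixed point of stepR
theorem repl_eq_of_stepR_fixed (l : List Char) (h : stepR l = l) (o c : Char) (hp : IsPair o c) :
    repl o c l = l := by
  have h1 := (repl_sublist '(' ')' l).length_le
  have h2 := (repl_sublist '[' ']' (repl '(' ')' l)).length_le
  have h3 := (repl_sublist '{' '}' (repl '[' ']' (repl '(' ')' l))).length_le
  unfold stepR at h
  have e3 : (repl '{' '}' (repl '[' ']' (repl '(' ')' l))).length = l.length := by rw [h]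
  have e1 : repl '(' ')' l = l :=
    (repl_sublist '(' ')' l).eq_of_length (le_antisymm h1 (by omega))
  rw [e1] at h2 h3 e3 h
  have e2 : repl '[' ']' l = l :=
    (repl_sublist '[' ']' l).eq_of_length (le_antisymm h2 (by omega))
  rw [e2] at h3 e3 h
  rcases hp with ⟨rfl, rfl⟩ | ⟨rfl, rfl⟩ | ⟨rfl, rfl⟩
  · exact e1
  · exact e2
  · exact h

theorem stepA_open (st : List Char) (c : Char) (h : isOpenB c = true) :
    stepA (some st) c = some (closerOf c :: st) := by
  simp only [isOpenB, Bool.or_eq_true, decide_eq_true_eq] at h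
  rcases h with (rfl | rfl) | rfl <;> simp [stepA]

theorem foldl_stepA_opens (l : List Char) (h : ∀ x ∈ l, isOpenB x = true) (st : List Char) :
    l.foldl stepA (some st) = some (l.reverse.map closerOf ++ st) := by
  induction l generalizing st with
  | nil => rfl
  | cons a t ih =>
    rw [List.foldl_cons, stepA_open st a (h a (by simp)),
        ih (fun x hx => h x (by simp [hx]))]
    simp

theorem isClose_of_bracket_not_open (c : Char) (hb : isBracketB c = true) (ho : isOpenB c = false) :
    isCloseB c = true := by
  simp only [isBracketB, isOpenB, isCloseB, Bool.or_eq_true, Bool.or_eq_false_iff,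
    decide_eq_true_eq, decide_eq_false_iff_not] at *
  tauto

theorem pair_of_open (o : Char) (h : isOpenB o = true) : IsPair o (closerOf o) := by
  simp only [isOpenB, Bool.or_eq_true, decide_eq_true_eq] at h
  rcases h with (rfl | rfl) | rfl <;> simp [IsPair, closerOf]

-- core lemma: on an irreducible bracket-only string, A's automaton accepts iff the string is empty
theorem accepted_iff_nil (r : List Char)
    (hb : ∀ x ∈ r, isBracketB x = true) (hfix : stepR r = r) :
    r.foldl stepA (some []) = some [] ↔ r = [] := by
  constructor
  · intro hacc
    by_contra hne
    -- split r into its maximal opener prefix and the rest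
    have hsplit : r.takeWhile isOpenB ++ r.dropWhile isOpenB = r := List.takeWhile_append_dropWhile
    cases hrest : r.dropWhile isOpenB with
    | nil =>
      -- r is all openers and nonempty: final stack nonempty
      rw [hrest, List.append_nil] at hsplit
      have hops : ∀ x ∈ r, isOpenB x = true := by
        intro x hx; rw [← hsplit] at hx; exact List.mem_takeWhile_imp hx
      rw [foldl_stepA_opens r hops []] at hacc
      simp at hacc
      exact hne hacc
    | cons c rest' =>
      have hcIn : c ∈ r := by rw [← hsplit, hrest]; simp
      have hcNotOpen : isOpenB c = false := by
        have := List.head?_dropWhile_not isOpenB r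
        rw [hrest] at this; simpa using this
      have hcClose : isCloseB c = true := isClose_of_bracket_not_open c (hb c hcIn) hcNotOpen
      cases hk : r.takeWhile isOpenB with
      | nil =>
        -- r starts with a closer on an empty stack: A fails immediately
        have hr : r = c :: rest' := by rw [← hsplit, hk, hrest]; rfl
        rw [hr, List.foldl_cons] at hacc
        have hstep : stepA (some []) c = none := by
          simp only [isCloseB, Bool.or_eq_true, decide_eq_true_eq] at hcClose
          rcases hcClose with (rfl | rfl) | rfl <;> simp [stepA]
        rw [hstep, foldl_stepA_none] at hacc
        simp at hacc
      | cons k0 kt =>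
        -- the opener prefix is nonempty; its last opener o is adjacent to the closer c
        obtain ⟨ks, o, hko⟩ : ∃ ks o, r.takeWhile isOpenB = ks ++ [o] := by
          rcases List.eq_nil_or_concat (r.takeWhile isOpenB) with hnil | ⟨ks, o, h'⟩
          · rw [hk] at hnil; exact absurd hnil (by simp)
          · exact ⟨ks, o, by simpa using h'⟩
        have hops : ∀ x ∈ ks ++ [o], isOpenB x = true := by
          intro x hx; rw [← hko] at hx; exact List.mem_takeWhile_imp hx
        have hoOpen : isOpenB o = true := hops o (by simp)
        have hr : r = ks ++ [o] ++ c :: rest' := by rw [← hsplit, hko, hrest]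
        -- c cannot be o's matching closer (stepR-fixed ⇒ no adjacent matched pair)
        have hne' : closerOf o ≠ c := by
          intro he
          have hrepl : repl o (closerOf o) r = r :=
            repl_eq_of_stepR_fixed r hfix o (closerOf o) (pair_of_open o hoOpen)
          exact no_adj_of_repl_eq o (closerOf o) r hrepl ks rest' (by rw [hr, he]; simp)
        -- run A: after the opener prefix the top of stack is closerOf o ≠ c ⇒ failure
        rw [hr] at hacc
        rw [List.append_assoc, List.foldl_append,
            foldl_stepA_opens ks (fun x hx => hops x (by simp [hx])) []] at hacc
        simp only [List.singleton_append, List.foldl_cons] at hacc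
        rw [stepA_open _ o hoOpen] at hacc
        have hstepc : stepA (some (closerOf o :: (List.map closerOf ks.reverse ++ []))) c = none := by
          simp only [isCloseB, Bool.or_eq_true, decide_eq_true_eq] at hcClose
          rcases hcClose with (rfl | rfl) | rfl <;> simp [stepA, hne']
        rw [hstepc, foldl_stepA_none] at hacc
        simp at hacc
  · intro h; rw [h]; rfl

-- ===== VERDICT (by name: the statement is the Claim_ definition above) =====
theorem has_syntax_errors_py_spec : Claim_equal_has_syntax_errors_py := by
  intro response _
  unfold Spec_has_syntax_errors_py has_syntax_errors_py has_syntax_errors_py_alt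
  set l := response.toList with hl
  set r := reduceFix (l.filter isBracketB) with hr
  have hrun : l.foldl stepA (some []) = r.foldl stepA (some []) := by
    rw [hr, foldl_stepA_reduceFix, foldl_stepA_filter]
  have hb : ∀ x ∈ r, isBracketB x = true := by
    intro x hx
    have := (reduceFix_sublist (l.filter isBracketB)).subset hx
    exact List.of_mem_filter this
  have hiff := accepted_iff_nil r hb (reduceFix_fixed _)
  rw [hrun]
  cases hres : r.foldl stepA (some []) with
  | none =>
    have : r ≠ [] := by intro h0; rw [hiff.mpr h0] at hres; simp at hres
    simp [this]
  | some st =>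
    by_cases hst : st = []
    · subst hst
      have : r = [] := hiff.mp hres
      simp [this]
    · have : r ≠ [] := by
        intro h0
        have := hiff.mpr h0
        rw [hres] at this
        exact hst (by injection this)
      simp [this, List.length_pos_iff, hst]
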